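-- pv_equiv track=rewrite | github.com/Jony-GydeRnE/locality-proof | computations/step4_laurent_block_analysis/n8/scripts/cascade_kill_n8.py | fish_substitutes_at_zone
-- ===== SOURCE A (Python) =====
-- def normalize(i, j, n):
--     """
--     Canonical name for the chord {i, j} of the n-gon.
--
--     LOGIC:  reduce both endpoints into {1, ..., n} mod n, then sort so the
--             smaller one comes first.  Returns a tuple (a, b) with a < b.
--
--     PHYSICS:  X_{ij} = X_{ji} kinematically, so we always store as the
--               ordered pair (a, b) with a < b for hashing/equality.
--     """
--     i = ((i - 1) % n) + 1
--     j = ((j - 1) % n) + 1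
--     if i > j:
--         i, j = j, i
--     return (i, j)
--
-- def zone_structure(r, n):
--     """
--     For zone Z_{r, r+2}, return (special, bare, pairs).
--
--     LOGIC:  identify the special chord (r, r+2), the bare chord (r+1, r-1)
--             (with r-1 taken cyclically), and the n-4 (companion, substitute)
--             pairs (X_{r,k}, X_{r+1,k}) for k = r+3, ..., r+n-2 (cyclic).
--
--     PHYSICS:  on the codimension-2 hidden-zero locus where all c_{r,*}
--               vanish, the master substitution rewrites every chord
--               incident to vertex r+1 as a Q-linear function of free
--               chords + the special chord:
--                   X_{r+1, k}    = X_{r, k} - X_{r, r+2}     (substitute)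
--                   X_{r+1, r-1}  = -X_{r, r+2}               (bare)
--               The "companion" of the substitute X_{r+1,k} is the row-r
--               chord X_{r,k}; both have endpoint r in common.
--     """
--     special = normalize(r,     r + 2, n)
--     bare    = normalize(r + 1, r - 1, n)
--     pairs = []
--     for offset in range(3, n - 1):
--         k = ((r - 1 + offset) % n) + 1
--         companion  = normalize(r,     k, n)
--         substitute = normalize(r + 1, k, n)
--         pairs.append((companion, substitute))
--     return special, bare, pairs
--
-- def fish_substitutes_at_zone(fish, zone_r, n):
--     """
--     Identify which chords of `fish` are substitutes at zone Z_{zone_r,...}.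
--
--     LOGIC:  for each chord c in fish, scan the (companion, substitute)
--             pairs of the zone; if c equals a substitute, record the pair.
--
--     PHYSICS:  substitutes are exactly the chords with vertex r+1 as
--               endpoint, except the bare.  Their Laurent expansion via
--               1/(X_comp - X_S) = -sum_{k>=1} X_comp^{k-1} / X_S^k is
--               what produces all the nontrivial "fingerprints" beyond
--               leading order.
--     """
--     _, _, pairs = zone_structure(zone_r, n)
--     out = []
--     for c in fish:
--         for companion, substitute in pairs:
--             if c == substitute:
--                 out.append((companion, substitute))
--                 break
--     return out
-- ===== SOURCE B (Python) =====
-- def normalize(i, j, n):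
--     i = ((i - 1) % n) + 1
--     j = ((j - 1) % n) + 1
--     if i > j:
--         i, j = j, i
--     return (i, j)
--
-- def fish_substitutes_at_zone(fish, zone_r, n):
--     # Invert each chord directly instead of scanning the zone's n-4 pairs:
--     # a chord c is a substitute iff it contains the reduced vertex r+1,
--     # its other endpoint is not one of the four excluded vertices, and c
--     # is exactly the normalized chord (r+1, other).
--     if n <= 4:
--         return []
--     vr1 = zone_r % n + 1                       # reduced r+1
--     excluded = {(zone_r - 1) % n + 1,          # reduced r
--                 vr1,                           # reduced r+1
--                 (zone_r + 1) % n + 1,          # reduced r+2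
--                 (zone_r - 2) % n + 1}          # reduced r-1
--     out = []
--     for c in fish:
--         a, b = c
--         if a == vr1:
--             other = b
--         elif b == vr1:
--             other = a
--         else:
--             continue
--         if other in excluded:
--             continue
--         if normalize(zone_r + 1, other, n) == c:
--             out.append((normalize(zone_r, other, n), c))
--     return out
-- ===== Notes on version B (the rewrite author's own statement) =====
-- stated objective: faster
-- what changed: B drops zone_structure's enumeration of the n-4 (companion, substitute) pairs and the inner scan over them; it inverts each chord directly: if a chord contains the reduced vertex r+1 and its other endpoint is outside the four excluded vertices and the chord is the normalized (r+1, other), it rebuilds the companion, so the per-chord cost is O(1) instead of O(n).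
import Mathlib
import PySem

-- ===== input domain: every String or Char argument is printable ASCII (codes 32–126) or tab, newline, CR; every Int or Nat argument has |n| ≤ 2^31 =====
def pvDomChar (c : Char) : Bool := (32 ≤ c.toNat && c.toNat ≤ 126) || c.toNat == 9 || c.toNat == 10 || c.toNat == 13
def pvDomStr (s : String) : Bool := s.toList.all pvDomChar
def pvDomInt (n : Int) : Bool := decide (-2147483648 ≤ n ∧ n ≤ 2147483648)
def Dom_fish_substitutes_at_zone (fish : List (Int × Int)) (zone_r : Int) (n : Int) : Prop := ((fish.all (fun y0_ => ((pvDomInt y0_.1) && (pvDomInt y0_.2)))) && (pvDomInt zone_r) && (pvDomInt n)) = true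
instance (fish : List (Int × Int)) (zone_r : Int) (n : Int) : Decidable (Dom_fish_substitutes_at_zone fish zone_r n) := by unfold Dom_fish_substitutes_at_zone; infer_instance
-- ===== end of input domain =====

-- B replaces A's enumeration of the zone's n-4 (companion, substitute) pairs and
-- the inner scan over them by a direct O(1) inversion of each chord.

-- ===== PORT A =====
-- normalize(i, j, n)
def pvNormalize (i j n : Int) : Int × Int :=
  let i := PySem.Int.mod (i - 1) n + 1
  let j := PySem.Int.mod (j - 1) n + 1
  if i > j then (j, i) else (i, j)

-- zone_structure(r, n) = (special, bare, pairs)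
def pvZoneStructure (r n : Int) : (Int × Int) × (Int × Int) × List ((Int × Int) × (Int × Int)) :=
  let special := pvNormalize r (r + 2) n
  let bare := pvNormalize (r + 1) (r - 1) n
  let pairs := (PySem.List.pyRange 3 (n - 1) 1).foldl
    (fun acc off =>
      let k := PySem.Int.mod (r - 1 + off) n + 1
      acc ++ [(pvNormalize r k n, pvNormalize (r + 1) k n)]) []
  (special, bare, pairs)

-- the inner 'for companion, substitute in pairs: if c == substitute: … break' scan
def pvScanPairs (pairs : List ((Int × Int) × (Int × Int))) (c : Int × Int) :
    Option ((Int × Int) × (Int × Int)) :=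
  match pairs with
  | [] => none
  | p :: rest => if c = p.2 then some p else pvScanPairs rest c

def fish_substitutes_at_zone (fish : List (Int × Int)) (zone_r : Int) (n : Int) :
    List ((Int × Int) × (Int × Int)) :=
  let pairs := (pvZoneStructure zone_r n).2.2
  fish.foldl (fun out c =>
    match pvScanPairs pairs c with
    | some p => out ++ [p]
    | none => out) []

-- ===== PORT B =====
def fish_substitutes_at_zone_alt (fish : List (Int × Int)) (zone_r : Int) (n : Int) :
    List ((Int × Int) × (Int × Int)) :=
  if n ≤ 4 then []
  else
    let vr1 := PySem.Int.mod zone_r n + 1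
    let excluded : PySem.Set Int := PySem.Set.ofList
      [PySem.Int.mod (zone_r - 1) n + 1, vr1,
       PySem.Int.mod (zone_r + 1) n + 1, PySem.Int.mod (zone_r - 2) n + 1]
    fish.foldl (fun out c =>
      if c.1 = vr1 ∨ c.2 = vr1 then
        let other := if c.1 = vr1 then c.2 else c.1
        if other ∈ excluded then out
        else if pvNormalize (zone_r + 1) other n = c then
          out ++ [(pvNormalize zone_r other n, c)]
        else out
      else out) []

-- ===== PRECONDITION & SPEC =====
-- Pre_ excludes exactly n = 0, where A raises ZeroDivisionError (modulo by zero).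
def Pre_fish_substitutes_at_zone (fish : List (Int × Int)) (zone_r : Int) (n : Int) : Prop := n ≠ 0
instance (fish : List (Int × Int)) (zone_r : Int) (n : Int) : Decidable (Pre_fish_substitutes_at_zone fish zone_r n) := by unfold Pre_fish_substitutes_at_zone; infer_instance
def pvWitness_fish_substitutes_at_zone : (List (Int × Int)) × Int × Int := ([(2, 4)], 1, 8)

def Spec_fish_substitutes_at_zone (fish : List (Int × Int)) (zone_r : Int) (n : Int) (out : List ((Int × Int) × (Int × Int))) : Prop := out = fish_substitutes_at_zone_alt fish zone_r n
instance (fish : List (Int × Int)) (zone_r : Int) (n : Int) (out : List ((Int × Int) × (Int × Int))) : Decidable (Spec_fish_substitutes_at_zone fish zone_r n out) := by unfold Spec_fish_substitutes_at_zone; infer_instance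

-- ===== CLAIM (what is proved, stated in full; the proofs are below) =====
def Claim_equal_fish_substitutes_at_zone : Prop := ∀ (fish : List (Int × Int)) (zone_r : Int) (n : Int), Dom_fish_substitutes_at_zone fish zone_r n → Pre_fish_substitutes_at_zone fish zone_r n → Spec_fish_substitutes_at_zone fish zone_r n (fish_substitutes_at_zone fish zone_r n)
-- ===== LEMMAS AND PROOFS =====

-- reduced vertex: ((x-1) % n) + 1, in emod form (= A's reduction for 0 < n)
def pvRed (x n : Int) : Int := (x - 1) % n + 1

theorem pvRed_bounds (x n : Int) (hn : 0 < n) : 1 ≤ pvRed x n ∧ pvRed x n ≤ n := by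
  unfold pvRed
  have h1 := Int.emod_nonneg (x - 1) (by omega : n ≠ 0)
  have h2 := Int.emod_lt_of_pos (x - 1) hn
  omega

theorem pvRed_eq_self (k n : Int) (_hn : 0 < n) (h1 : 1 ≤ k) (h2 : k ≤ n) : pvRed k n = k := by
  unfold pvRed
  rw [Int.emod_eq_of_lt (by omega) (by omega)]
  ring

theorem pvRed_eq_iff (x y n : Int) (_hn : 0 < n) : pvRed x n = pvRed y n ↔ n ∣ (y - x) := by
  unfold pvRed
  constructor
  · intro h
    have h' : Int.ModEq n (x - 1) (y - 1) := by simpa [Int.ModEq] using (by omega : (x-1) % n = (y-1) % n)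
    have := Int.ModEq.dvd h'
    simpa using (by simpa using this : n ∣ (y - 1) - (x - 1))
  · intro h
    have h' : Int.ModEq n (x - 1) (y - 1) := Int.modEq_iff_dvd.mpr (by
      have : (y - 1) - (x - 1) = y - x := by ring
      rw [this]; exact h)
    have := h'
    simp [Int.ModEq] at this
    omega

theorem pvDvdSmall (n d : Int) (hn : 0 < n) (h : n ∣ d) (h1 : -n < d) (h2 : d < n) : d = 0 := by
  obtain ⟨t, ht⟩ := h
  subst ht
  have ht1 : t < 1 := by nlinarith
  have ht2 : -1 < t := by nlinarith
  have : t = 0 := by omega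
  simp [this]

theorem pvRed_add_emod (r x n : Int) (hn : 0 < n) : pvRed (r + x % n) n = pvRed (r + x) n := by
  rw [pvRed_eq_iff _ _ _ hn]
  exact ⟨x / n, by rw [Int.emod_def]; ring⟩

theorem pvScan_none (l : List ((Int × Int) × (Int × Int))) (c : Int × Int)
    (h : ∀ p ∈ l, p.2 ≠ c) : pvScanPairs l c = none := by
  induction l with
  | nil => rfl
  | cons p rest ih =>
    simp only [pvScanPairs]
    rw [if_neg (fun hc => h p (by simp) hc.symm)]
    exact ih (fun q hq => h q (by simp [hq]))

theorem pvScan_some (l : List ((Int × Int) × (Int × Int))) (c : Int × Int)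
    (v : (Int × Int) × (Int × Int)) (hmem : v ∈ l) (hv : v.2 = c)
    (huniq : ∀ p ∈ l, p.2 = c → p = v) : pvScanPairs l c = some v := by
  induction l with
  | nil => simp at hmem
  | cons p rest ih =>
    simp only [pvScanPairs]
    by_cases hc : c = p.2
    · rw [if_pos hc]
      rw [huniq p (by simp) hc.symm]
    · rw [if_neg hc]
      rcases List.mem_cons.mp hmem with h | h
      · exact absurd (h ▸ hv) (fun hh => hc hh.symm)
      · exact ih h (fun q hq hq2 => huniq q (by simp [hq]) hq2)

theorem pvPairs_eq (r n : Int) : (pvZoneStructure r n).2.2 =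
    (PySem.List.pyRange 3 (n - 1) 1).map (fun off =>
      (pvNormalize r (PySem.Int.mod (r - 1 + off) n + 1) n,
       pvNormalize (r + 1) (PySem.Int.mod (r - 1 + off) n + 1) n)) := by
  simp only [pvZoneStructure]
  rw [PySem.List.foldl_append_singleton_eq_map]
  simp

theorem pvNormalize_eq (i j n : Int) (hn : 0 < n) :
    pvNormalize i j n = if pvRed i n > pvRed j n then (pvRed j n, pvRed i n) else (pvRed i n, pvRed j n) := by
  simp [pvNormalize, pvRed, PySem.Int.mod_eq_emod_of_pos hn]

theorem pvK_red (r off n : Int) (hn : 0 < n) :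
    PySem.Int.mod (r - 1 + off) n + 1 = pvRed (r + off) n := by
  rw [PySem.Int.mod_eq_emod_of_pos hn]
  unfold pvRed
  congr 1
  congr 1
  ring

theorem pvK_ne (r off e n : Int) (hn : 0 < n) (he1 : 0 < off - e) (he2 : off - e < n) :
    pvRed (r + off) n ≠ pvRed (r + e) n := by
  intro h
  have hd := (pvRed_eq_iff _ _ _ hn).mp h
  have : (r + e) - (r + off) = -(off - e) := by ring
  rw [this] at hd
  have := pvDvdSmall n _ hn hd (by omega) (by omega)
  omega

theorem pvExists_off (r other n : Int) (hn : 5 ≤ n) (h1 : 1 ≤ other) (h2 : other ≤ n)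
    (hx0 : other ≠ pvRed r n) (hx1 : other ≠ pvRed (r + 1) n)
    (hx2 : other ≠ pvRed (r + 2) n) (hx3 : other ≠ pvRed (r - 1) n) :
    ∃ off, 3 ≤ off ∧ off < n - 1 ∧ pvRed (r + off) n = other := by
  have hn0 : 0 < n := by omega
  refine ⟨(other - r) % n, ?_⟩
  have hred : pvRed (r + (other - r) % n) n = other := by
    rw [pvRed_add_emod _ _ _ hn0]
    have : r + (other - r) = other := by ring
    rw [this, pvRed_eq_self _ _ hn0 h1 h2]
  have hb1 : 0 ≤ (other - r) % n := Int.emod_nonneg _ (by omega)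
  have hb2 : (other - r) % n < n := Int.emod_lt_of_pos _ hn0
  have h0 : (other - r) % n ≠ 0 := by
    intro h; rw [h] at hred; simp at hred; exact hx0 hred.symm
  have hh1 : (other - r) % n ≠ 1 := by
    intro h; rw [h] at hred; exact hx1 hred.symm
  have hh2 : (other - r) % n ≠ 2 := by
    intro h; rw [h] at hred; exact hx2 hred.symm
  have hh3 : (other - r) % n ≠ n - 1 := by
    intro h
    rw [h] at hred
    have : pvRed (r + (n - 1)) n = pvRed (r - 1) n := by
      rw [pvRed_eq_iff _ _ _ hn0]
      exact ⟨-1, by ring⟩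
    rw [this] at hred
    exact hx3 hred.symm
  exact ⟨by omega, by omega, hred⟩

theorem pvSwapInj (x y z : Int) (_hy : y ≠ x) (_hz : z ≠ x)
    (h : (if x > y then (y, x) else (x, y)) = (if x > z then (z, x) else (x, z))) : y = z := by
  split_ifs at h <;> simp [Prod.ext_iff] at h <;> omega

theorem pvModRed (a n : Int) (hn : 0 < n) : PySem.Int.mod a n + 1 = pvRed (a + 1) n := by
  rw [PySem.Int.mod_eq_emod_of_pos hn]
  unfold pvRed
  norm_num

-- every element of the zone's pair list: its k is reduced and avoids the four special vertices
theorem pvMem_pairs (r n : Int) (hn : 5 ≤ n) (p : (Int × Int) × (Int × Int))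
    (hp : p ∈ (pvZoneStructure r n).2.2) :
    ∃ k, 1 ≤ k ∧ k ≤ n ∧ k ≠ pvRed r n ∧ k ≠ pvRed (r + 1) n ∧ k ≠ pvRed (r + 2) n ∧
      k ≠ pvRed (r - 1) n ∧ p = (pvNormalize r k n, pvNormalize (r + 1) k n) := by
  have hn0 : 0 < n := by omega
  rw [pvPairs_eq] at hp
  obtain ⟨off, hoff, hpe⟩ := List.mem_map.mp hp
  rw [PySem.List.mem_pyRange_one] at hoff
  refine ⟨pvRed (r + off) n, (pvRed_bounds _ _ hn0).1, (pvRed_bounds _ _ hn0).2, ?_, ?_, ?_, ?_, ?_⟩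
  · have := pvK_ne r off 0 n hn0 (by omega) (by omega)
    simpa using this
  · exact pvK_ne r off 1 n hn0 (by omega) (by omega)
  · exact pvK_ne r off 2 n hn0 (by omega) (by omega)
  · have := pvK_ne r off (-1) n hn0 (by omega) (by omega)
    simpa [sub_eq_add_neg] using this
  · rw [← hpe, pvK_red _ _ _ hn0]

theorem pvMem_pairs_intro (r n k : Int) (hn : 5 ≤ n) (h1 : 1 ≤ k) (h2 : k ≤ n)
    (hx0 : k ≠ pvRed r n) (hx1 : k ≠ pvRed (r + 1) n) (hx2 : k ≠ pvRed (r + 2) n)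
    (hx3 : k ≠ pvRed (r - 1) n) :
    (pvNormalize r k n, pvNormalize (r + 1) k n) ∈ (pvZoneStructure r n).2.2 := by
  have hn0 : 0 < n := by omega
  obtain ⟨off, ho1, ho2, hred⟩ := pvExists_off r k n hn h1 h2 hx0 hx1 hx2 hx3
  rw [pvPairs_eq]
  exact List.mem_map.mpr ⟨off, PySem.List.mem_pyRange_one.mpr ⟨by omega, by omega⟩,
    by rw [pvK_red _ _ _ hn0, hred]⟩

-- shape of a substitute: it is (k, vr1) or (vr1, k)
theorem pvSubst_eq (r n k a b : Int) (hn0 : 0 < n) (h1 : 1 ≤ k) (h2 : k ≤ n)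
    (heq : pvNormalize (r + 1) k n = (a, b)) :
    (a = k ∧ b = pvRed (r + 1) n) ∨ (a = pvRed (r + 1) n ∧ b = k) := by
  rw [pvNormalize_eq _ _ _ hn0, pvRed_eq_self k n hn0 h1 h2] at heq
  split_ifs at heq <;> simp [Prod.ext_iff] at heq <;> omega

-- the per-chord equivalence, option form
theorem pvChordOpt (r n : Int) (hn : 5 ≤ n) (c : Int × Int) :
    pvScanPairs ((pvZoneStructure r n).2.2) c =
      (if c.1 = PySem.Int.mod r n + 1 ∨ c.2 = PySem.Int.mod r n + 1 then
        if (if c.1 = PySem.Int.mod r n + 1 then c.2 else c.1) ∈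
            (PySem.Set.ofList [PySem.Int.mod (r - 1) n + 1, PySem.Int.mod r n + 1,
              PySem.Int.mod (r + 1) n + 1, PySem.Int.mod (r - 2) n + 1] : PySem.Set Int) then none
        else if pvNormalize (r + 1) (if c.1 = PySem.Int.mod r n + 1 then c.2 else c.1) n = c then
          some (pvNormalize r (if c.1 = PySem.Int.mod r n + 1 then c.2 else c.1) n, c)
        else none
      else none) := by
  have hn0 : 0 < n := by omega
  obtain ⟨a, b⟩ := c
  have e0 : PySem.Int.mod (r - 1) n + 1 = pvRed r n := by rw [pvModRed _ _ hn0]; norm_num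
  have e1 : PySem.Int.mod r n + 1 = pvRed (r + 1) n := pvModRed r n hn0
  have e2 : PySem.Int.mod (r + 1) n + 1 = pvRed (r + 2) n := by
    rw [pvModRed _ _ hn0, show r + 1 + 1 = r + 2 from by ring]
  have e3 : PySem.Int.mod (r - 2) n + 1 = pvRed (r - 1) n := by
    rw [pvModRed _ _ hn0, show r - 2 + 1 = r - 1 from by ring]
  rw [e0, e1, e2, e3]
  by_cases hab : a = pvRed (r + 1) n ∨ b = pvRed (r + 1) n
  · rw [if_pos hab]
    by_cases hexc : (if a = pvRed (r + 1) n then b else a) ∈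
        (PySem.Set.ofList [pvRed r n, pvRed (r + 1) n, pvRed (r + 2) n, pvRed (r - 1) n] : PySem.Set Int)
    · rw [if_pos hexc]
      rw [PySem.Set.mem_ofList] at hexc
      simp only [List.mem_cons, List.not_mem_nil, or_false] at hexc
      apply pvScan_none
      intro p hp heq
      obtain ⟨k, h1, h2, hx0, hx1, hx2, hx3, hpe⟩ := pvMem_pairs r n hn p hp
      have hsub : pvNormalize (r + 1) k n = (a, b) := by rw [hpe] at heq; exact heq
      rcases pvSubst_eq r n k a b hn0 h1 h2 hsub with ⟨ha, hb⟩ | ⟨ha, hb⟩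
      · have hane : a ≠ pvRed (r + 1) n := by rw [ha]; exact hx1
        rw [if_neg hane, ha] at hexc
        tauto
      · rw [if_pos ha, hb] at hexc
        tauto
    · rw [if_neg hexc]
      rw [PySem.Set.mem_ofList] at hexc
      simp only [List.mem_cons, List.not_mem_nil, or_false, not_or] at hexc
      by_cases hcand : pvNormalize (r + 1) (if a = pvRed (r + 1) n then b else a) n = (a, b)
      · rw [if_pos hcand]
        -- the chord is a genuine substitute; its other endpoint is reduced
        set other := if a = pvRed (r + 1) n then b else a with hother
        have hob := pvRed_bounds other n hn0
        have hredo : pvRed other n = other := by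
          have hc := hcand
          rw [pvNormalize_eq _ _ _ hn0] at hc
          split_ifs at hc with hgt <;> simp only [Prod.mk.injEq] at hc
          · -- (pvRed other, pvRed (r+1)) = (a, b): a = pvRed other, b = vr1
            by_cases haeq : a = pvRed (r + 1) n
            · -- other = b = vr1, excluded — contradiction
              exfalso
              have : other = pvRed (r + 1) n := by
                rw [hother, if_pos haeq, ← hc.2]
              exact hexc.2.1 this
            · rw [hc.1, hother, if_neg haeq]
          · rw [hc.2, hother, if_pos hc.1.symm]
        have h1 : 1 ≤ other := by omega
        have h2 : other ≤ n := by omega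
        rw [← hcand]
        apply pvScan_some _ _ (pvNormalize r other n, pvNormalize (r + 1) other n)
        · exact pvMem_pairs_intro r n other hn h1 h2 hexc.1 hexc.2.1 hexc.2.2.1 hexc.2.2.2
        · rfl
        · intro p hp heq
          obtain ⟨k, hk1, hk2, hkx0, hkx1, hkx2, hkx3, hpe⟩ := pvMem_pairs r n hn p hp
          have hke : k = other := by
            have hsub : pvNormalize (r + 1) k n = pvNormalize (r + 1) other n := by
              rw [hpe] at heq
              exact heq
            rw [pvNormalize_eq _ _ _ hn0, pvNormalize_eq _ _ _ hn0,
              pvRed_eq_self k n hn0 hk1 hk2, hredo] at hsub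
            exact pvSwapInj (pvRed (r + 1) n) k other (fun h => hkx1 h) (fun h => hexc.2.1 h) hsub
          rw [hpe, hke]
      · rw [if_neg hcand]
        apply pvScan_none
        intro p hp heq
        obtain ⟨k, h1, h2, hx0, hx1, hx2, hx3, hpe⟩ := pvMem_pairs r n hn p hp
        have hsub : pvNormalize (r + 1) k n = (a, b) := by rw [hpe] at heq; exact heq
        rcases pvSubst_eq r n k a b hn0 h1 h2 hsub with ⟨ha, hb⟩ | ⟨ha, hb⟩
        · have hane : a ≠ pvRed (r + 1) n := by rw [ha]; exact hx1
          apply hcand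
          rw [if_neg hane]
          calc pvNormalize (r + 1) a n = pvNormalize (r + 1) k n := by rw [ha]
            _ = (a, b) := hsub
        · apply hcand
          rw [if_pos ha]
          calc pvNormalize (r + 1) b n = pvNormalize (r + 1) k n := by rw [hb]
            _ = (a, b) := hsub
  · rw [if_neg hab]
    apply pvScan_none
    intro p hp heq
    obtain ⟨k, h1, h2, hx0, hx1, hx2, hx3, hpe⟩ := pvMem_pairs r n hn p hp
    have hsub : pvNormalize (r + 1) k n = (a, b) := by rw [hpe] at heq; exact heq
    rcases pvSubst_eq r n k a b hn0 h1 h2 hsub with ⟨_, hb⟩ | ⟨ha, _⟩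
    · exact hab (Or.inr hb)
    · exact hab (Or.inl ha)

-- per-chord equivalence, fold-step form
theorem pvChord (r n : Int) (hn : 5 ≤ n) (c : Int × Int)
    (acc : List ((Int × Int) × (Int × Int))) :
    (match pvScanPairs ((pvZoneStructure r n).2.2) c with
      | some p => acc ++ [p]
      | none => acc) =
      (if c.1 = PySem.Int.mod r n + 1 ∨ c.2 = PySem.Int.mod r n + 1 then
        if (if c.1 = PySem.Int.mod r n + 1 then c.2 else c.1) ∈
            (PySem.Set.ofList [PySem.Int.mod (r - 1) n + 1, PySem.Int.mod r n + 1,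
              PySem.Int.mod (r + 1) n + 1, PySem.Int.mod (r - 2) n + 1] : PySem.Set Int) then acc
        else if pvNormalize (r + 1) (if c.1 = PySem.Int.mod r n + 1 then c.2 else c.1) n = c then
          acc ++ [(pvNormalize r (if c.1 = PySem.Int.mod r n + 1 then c.2 else c.1) n, c)]
        else acc
      else acc) := by
  rw [pvChordOpt r n hn c]
  split_ifs <;> rfl

theorem pvFold_eq (r n : Int) (hn : 5 ≤ n) (l : List (Int × Int))
    (acc : List ((Int × Int) × (Int × Int))) :
    l.foldl (fun out c =>
      match pvScanPairs ((pvZoneStructure r n).2.2) c with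
      | some p => out ++ [p]
      | none => out) acc =
    l.foldl (fun out c =>
      if c.1 = PySem.Int.mod r n + 1 ∨ c.2 = PySem.Int.mod r n + 1 then
        if (if c.1 = PySem.Int.mod r n + 1 then c.2 else c.1) ∈
            (PySem.Set.ofList [PySem.Int.mod (r - 1) n + 1, PySem.Int.mod r n + 1,
              PySem.Int.mod (r + 1) n + 1, PySem.Int.mod (r - 2) n + 1] : PySem.Set Int) then out
        else if pvNormalize (r + 1) (if c.1 = PySem.Int.mod r n + 1 then c.2 else c.1) n = c then
          out ++ [(pvNormalize r (if c.1 = PySem.Int.mod r n + 1 then c.2 else c.1) n, c)]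
        else out
      else out) acc := by
  induction l generalizing acc with
  | nil => rfl
  | cons c rest ih =>
    simp only [List.foldl_cons]
    rw [pvChord r n hn c acc]
    exact ih _

theorem pvFoldA_small (r n : Int) (h4 : n - 1 ≤ 3) (l : List (Int × Int))
    (acc : List ((Int × Int) × (Int × Int))) :
    l.foldl (fun out c =>
      match pvScanPairs ((pvZoneStructure r n).2.2) c with
      | some p => out ++ [p]
      | none => out) acc = acc := by
  have hpairs : (pvZoneStructure r n).2.2 = [] := by
    rw [pvPairs_eq, PySem.List.pyRange_one_eq_nil h4]
    rfl
  rw [hpairs]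
  induction l generalizing acc with
  | nil => rfl
  | cons c rest ih =>
    simp only [List.foldl_cons, pvScanPairs]
    exact ih _

-- ===== VERDICT (by name: the statement is the Claim_ definition above) =====
theorem fish_substitutes_at_zone_spec : Claim_equal_fish_substitutes_at_zone := by
  intro fish r n _ _
  unfold Spec_fish_substitutes_at_zone fish_substitutes_at_zone fish_substitutes_at_zone_alt
  by_cases h4 : n ≤ 4
  · rw [if_pos h4]
    exact pvFoldA_small r n (by omega) fish []
  · rw [if_neg h4]
    exact pvFold_eq r n (by omega) fish []
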